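-- pv_equiv track=rewrite | github.com/linhxm/SorcererXStreme-AI | lambda/metaphysical/lambda_function.py | calculate_life_path
-- ===== SOURCE A (Python) =====
-- def calculate_life_path(day, month, year):
--     full_str = f"{day}{month}{year}"
--     total = sum(int(digit) for digit in full_str)
--     while total > 9:
--         if total in [11, 22, 33, 10]:
--             break
--         total = sum(int(digit) for digit in str(total))
--     return str(total)
-- ===== SOURCE B (Python) =====
-- def calculate_life_path(day, month, year):
--     def digit_sum(n):
--         s = 0
--         while n > 0:
--             n, r = divmod(n, 10)
--             s += r
--         return s
--
--     def reduce(n):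
--         if n <= 9 or n in (10, 11, 22, 33):
--             return n
--         return reduce(digit_sum(n))
--
--     return str(reduce(digit_sum(day) + digit_sum(month) + digit_sum(year)))
-- ===== Notes on version B (the rewrite author's own statement) =====
-- stated objective: alternative
-- what changed: B replaces A's string-based digit summing (formatting numbers/totals and re-parsing each character with int) by pure integer arithmetic via divmod, and replaces the while-loop with top-of-loop break by a recursive reducer that checks the base/master cases (<=9, 10, 11, 22, 33) before each reduction step.
-- outside the precondition, e.g. on calculate_life_path(-1, 0, 0): A raises ValueError, B returns '0'
import Mathlib
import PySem

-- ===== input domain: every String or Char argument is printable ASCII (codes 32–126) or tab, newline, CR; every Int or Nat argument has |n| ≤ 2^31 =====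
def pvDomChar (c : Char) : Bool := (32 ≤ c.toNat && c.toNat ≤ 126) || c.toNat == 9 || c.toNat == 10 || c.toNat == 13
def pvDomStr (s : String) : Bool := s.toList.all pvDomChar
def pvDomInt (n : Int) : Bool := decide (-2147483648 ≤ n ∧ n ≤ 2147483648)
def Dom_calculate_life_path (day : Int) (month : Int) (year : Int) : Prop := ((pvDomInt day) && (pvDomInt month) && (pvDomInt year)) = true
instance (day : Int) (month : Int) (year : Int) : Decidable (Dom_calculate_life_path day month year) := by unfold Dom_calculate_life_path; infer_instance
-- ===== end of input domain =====

-- B replaces A's string-based digit summing (format + re-parse each char with int) by integer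
-- arithmetic with divmod, and the while-loop by a recursive reducer; equal on all nonnegative inputs.

-- ===== PORT A =====
-- int(digit): Python raises ValueError on a non-digit char (the '-' of a negative number);
-- those inputs are excluded by Pre_, so the `.getD 0` default is never taken under Pre_.
def pvDigitVal (c : Char) : Int := (PySem.Int.ofChars? [c]).getD 0

-- sum(int(digit) for digit in s)
def pvChSum (cs : List Char) : Int := cs.foldl (fun a c => a + pvDigitVal c) 0

-- (termination helpers for the two ports; cited in their decreasing_by)
-- arithmetic digit sum of a Nat (proof/termination helper)
theorem pvDsNat_dec (n : Nat) (h : ¬ n < 10) : n / 10 < n :=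
  Nat.div_lt_self (by omega) (by omega)

def pvDsNat (n : Nat) : Nat :=
  if n < 10 then n else n % 10 + pvDsNat (n / 10)
decreasing_by exact pvDsNat_dec n ‹_›

theorem pvDsNat_le (n : Nat) : pvDsNat n ≤ n := by
  induction n using Nat.strong_induction_on with
  | _ n ih =>
    rw [pvDsNat]
    split
    · exact le_refl n
    · have h10 : ¬ n < 10 := by assumption
      have := ih (n / 10) (Nat.div_lt_self (by omega) (by omega))
      omega

theorem pvDsNat_lt (n : Nat) (h : 10 ≤ n) : pvDsNat n < n := by
  rw [pvDsNat]
  have := pvDsNat_le (n / 10)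
  split
  · omega
  · omega

theorem pvDigitVal_digitChar (m : Nat) (h : m < 10) : pvDigitVal m.digitChar = (m : Int) := by
  interval_cases m <;> decide

theorem pvChSum_eq_sum (cs : List Char) : pvChSum cs = (cs.map pvDigitVal).sum := by
  simpa using PySem.List.foldl_add cs pvDigitVal 0

theorem pvToDigitsCore_sum (f : Nat) : ∀ (n : Nat) (l : List Char), n ≤ f →
    ((Nat.toDigitsCore 10 (f + 1) n l).map pvDigitVal).sum
      = (pvDsNat n : Int) + (l.map pvDigitVal).sum := by
  induction f with
  | zero =>
    intro n l hn
    have hn0 : n = 0 := by omega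
    subst hn0
    simp [Nat.toDigitsCore, pvDsNat, pvDigitVal_digitChar 0 (by omega)]
  | succ f ih =>
    intro n l hn
    by_cases h0 : n / 10 = 0
    · have hlt : n < 10 := by omega
      rw [show Nat.toDigitsCore 10 (f + 1 + 1) n l = (n % 10).digitChar :: l by
        simp [Nat.toDigitsCore, h0]]
      have hmod : n % 10 = n := Nat.mod_eq_of_lt hlt
      simp [pvDsNat, hlt, hmod, pvDigitVal_digitChar n hlt]
    · have h10 : 10 ≤ n := by omega
      rw [show Nat.toDigitsCore 10 (f + 1 + 1) n l
            = Nat.toDigitsCore 10 (f + 1) (n / 10) ((n % 10).digitChar :: l) by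
        simp [Nat.toDigitsCore, h0]]
      rw [ih (n / 10) _ (by omega)]
      simp only [List.map_cons, List.sum_cons,
        pvDigitVal_digitChar (n % 10) (Nat.mod_lt n (by omega))]
      conv_rhs => rw [pvDsNat]
      rw [if_neg (by omega)]
      push_cast
      ring

theorem pvChSum_toDigits (n : Nat) : pvChSum (Nat.toDigits 10 n) = (pvDsNat n : Int) := by
  rw [pvChSum_eq_sum, Nat.toDigits, pvToDigitsCore_sum n n [] (le_refl n)]
  simp

theorem pvChSum_toChars (t : Int) (h : 0 ≤ t) :
    pvChSum (PySem.Int.toChars t) = (pvDsNat t.toNat : Int) := by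
  rw [PySem.Int.toChars, if_neg (by omega)]
  exact pvChSum_toDigits t.toNat

theorem pvLoopA_dec (t : Int) (h1 : 9 < t) : (pvChSum (PySem.Int.toChars t)).toNat < t.toNat := by
  rw [pvChSum_toChars t (by omega)]
  have := pvDsNat_lt t.toNat (by omega)
  omega

-- the while-loop of A (top-of-loop test, break on the master numbers)
def pvLoopA (t : Int) : Int :=
  if 9 < t then
    if t = 11 ∨ t = 22 ∨ t = 33 ∨ t = 10 then t
    else pvLoopA (pvChSum (PySem.Int.toChars t))
  else t
termination_by t.toNat
decreasing_by exact pvLoopA_dec t ‹_›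

def calculate_life_path (day : Int) (month : Int) (year : Int) : String :=
  PySem.Int.toStr
    (pvLoopA (pvChSum (PySem.Int.toChars day ++ PySem.Int.toChars month ++ PySem.Int.toChars year)))

-- ===== PORT B =====
-- def digit_sum(n): s = 0; while n > 0: n, r = divmod(n, 10); s += r; return s
theorem pvDigitSumB_dec (n : Int) (h : 0 < n) : (PySem.Int.floordiv n 10).toNat < n.toNat := by
  rw [PySem.Int.floordiv_eq_ediv_of_pos (by omega)]
  omega

def pvDigitSumB (n : Int) : Int :=
  if 0 < n then PySem.Int.mod n 10 + pvDigitSumB (PySem.Int.floordiv n 10) else 0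
termination_by n.toNat
decreasing_by exact pvDigitSumB_dec n ‹_›

theorem pvDigitSumB_eq (n : Int) (h : 0 ≤ n) : pvDigitSumB n = (pvDsNat n.toNat : Int) := by
  suffices H : ∀ (k : Nat) (n : Int), 0 ≤ n → n.toNat ≤ k → pvDigitSumB n = (pvDsNat n.toNat : Int) from
    H n.toNat n h le_rfl
  intro k
  induction k with
  | zero =>
    intro n h hk
    have hn0 : n = 0 := by omega
    subst hn0
    rw [pvDigitSumB]
    simp [pvDsNat]
  | succ k ih =>
    intro n h hk
    rw [pvDigitSumB]
    by_cases h0 : 0 < n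
    · rw [if_pos h0]
      rw [PySem.Int.floordiv_eq_ediv_of_pos (by omega), PySem.Int.mod_eq_emod_of_pos (by omega)]
      rw [ih (n / 10) (by positivity) (by omega)]
      have hdiv : (n / 10).toNat = n.toNat / 10 := by omega
      rw [hdiv]
      conv_rhs => rw [pvDsNat]
      by_cases hlt : n.toNat < 10
      · rw [if_pos hlt]
        have hz : n.toNat / 10 = 0 := by omega
        rw [hz]
        simp [pvDsNat]
        omega
      · rw [if_neg hlt]
        push_cast
        omega
    · rw [if_neg h0]
      have hn0 : n = 0 := by omega
      subst hn0
      simp [pvDsNat]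

-- def reduce(n): return n if n <= 9 or n in (10, 11, 22, 33) else reduce(digit_sum(n))
theorem pvReduceB_dec (n : Int) (h : ¬(n ≤ 9 ∨ n = 10 ∨ n = 11 ∨ n = 22 ∨ n = 33)) :
    (pvDigitSumB n).toNat < n.toNat := by
  push Not at h
  rw [pvDigitSumB_eq n (by omega)]
  have := pvDsNat_lt n.toNat (by omega)
  omega

def pvReduceB (n : Int) : Int :=
  if n ≤ 9 ∨ n = 10 ∨ n = 11 ∨ n = 22 ∨ n = 33 then n
  else pvReduceB (pvDigitSumB n)
termination_by n.toNat
decreasing_by exact pvReduceB_dec n ‹_›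

def calculate_life_path_alt (day : Int) (month : Int) (year : Int) : String :=
  PySem.Int.toStr (pvReduceB (pvDigitSumB day + pvDigitSumB month + pvDigitSumB year))

-- ===== PRECONDITION & SPEC =====
-- Pre_ excludes negative arguments: there the f-string contains '-', on which A's int(digit) raises ValueError.
def Pre_calculate_life_path (day : Int) (month : Int) (year : Int) : Prop :=
  0 ≤ day ∧ 0 ≤ month ∧ 0 ≤ year
instance (day : Int) (month : Int) (year : Int) : Decidable (Pre_calculate_life_path day month year) := by
  unfold Pre_calculate_life_path; infer_instance

def pvWitness_calculate_life_path : Int × Int × Int := (4, 7, 1990)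

def Spec_calculate_life_path (day : Int) (month : Int) (year : Int) (out : String) : Prop :=
  out = calculate_life_path_alt day month year
instance (day : Int) (month : Int) (year : Int) (out : String) : Decidable (Spec_calculate_life_path day month year out) := by
  unfold Spec_calculate_life_path; infer_instance

-- ===== CLAIM (what is proved, stated in full; the proofs are below) =====
def Claim_equal_calculate_life_path : Prop := ∀ (day : Int) (month : Int) (year : Int), Dom_calculate_life_path day month year → Pre_calculate_life_path day month year → Spec_calculate_life_path day month year (calculate_life_path day month year)

-- ===== LEMMAS AND PROOFS =====
theorem pvChSum_append (xs ys : List Char) : pvChSum (xs ++ ys) = pvChSum xs + pvChSum ys := by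
  simp [pvChSum_eq_sum]

theorem pvLoopA_eq_pvReduceB (t : Int) : pvLoopA t = pvReduceB t := by
  induction hk : t.toNat using Nat.strong_induction_on generalizing t with
  | _ k ih =>
    rw [pvLoopA, pvReduceB]
    by_cases h9 : 9 < t
    · by_cases hm : t = 11 ∨ t = 22 ∨ t = 33 ∨ t = 10
      · rw [if_pos h9, if_pos hm, if_pos (by omega)]
      · rw [if_pos h9, if_neg hm, if_neg (by omega)]
        rw [pvChSum_toChars t (by omega), ← pvDigitSumB_eq t (by omega)]
        have hlt : (pvDigitSumB t).toNat < k := by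
          rw [pvDigitSumB_eq t (by omega)]
          have := pvDsNat_lt t.toNat (by omega)
          omega
        exact ih _ hlt _ rfl
    · rw [if_neg h9, if_pos (by omega)]


-- ===== VERDICT (by name: the statement is the Claim_ definition above) =====
theorem calculate_life_path_spec : Claim_equal_calculate_life_path := by
  intro day month year _ hpre
  obtain ⟨hd, hm, hy⟩ := hpre
  unfold Spec_calculate_life_path calculate_life_path calculate_life_path_alt
  rw [pvChSum_append, pvChSum_append]
  rw [pvChSum_toChars day hd, pvChSum_toChars month hm, pvChSum_toChars year hy]
  rw [pvDigitSumB_eq day hd, pvDigitSumB_eq month hm, pvDigitSumB_eq year hy]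
  rw [pvLoopA_eq_pvReduceB]
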